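-- pv_equiv track=rewrite | github.com/MartinGangand/tradeflow | time_series/src/ar_model/select_nb_lags_methods.py | dispatch_indexes
-- ===== SOURCE A (Python) =====
-- from typing import List, Literal
--
-- def dispatch_indexes(max_nb_lags, nb_processes) -> List[List[int]]:
--     slice_indexes_per_process = [[] for _ in range(nb_processes)]
--     direction = True
--     for i in range(max_nb_lags + 1):
--         args_idx = i % nb_processes
--         new_args_idx = args_idx if direction else nb_processes - 1 - args_idx
--         direction = not(direction) if args_idx == nb_processes - 1 else direction
--         slice_indexes_per_process[new_args_idx].append(i + 1)
--
--     assert(sum([len(l) for l in slice_indexes_per_process]) == max_nb_lags + 1)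
--     return slice_indexes_per_process
-- ===== SOURCE B (Python) =====
-- def dispatch_indexes(max_nb_lags, nb_processes):
--     n = max_nb_lags + 1
--     out = []
--     for c in range(nb_processes):
--         col = []
--         for base in range(0, n, 2 * nb_processes):
--             if base + c < n:
--                 col.append(base + c + 1)
--             if base + 2 * nb_processes - 1 - c < n:
--                 col.append(base + 2 * nb_processes - c)
--         out.append(col)
--     return out
-- ===== Notes on version B (the rewrite author's own statement) =====
-- stated objective: alternative
-- what changed: Instead of one pass over all indexes threading a mutable direction flip-flop and appending into an indexed list of lists, B builds each process's column independently, generating its members arithmetically per 2*nb_processes-period (base+c+1 from the forward row, base+2*nb_processes-c from the backward row).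
import Mathlib
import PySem

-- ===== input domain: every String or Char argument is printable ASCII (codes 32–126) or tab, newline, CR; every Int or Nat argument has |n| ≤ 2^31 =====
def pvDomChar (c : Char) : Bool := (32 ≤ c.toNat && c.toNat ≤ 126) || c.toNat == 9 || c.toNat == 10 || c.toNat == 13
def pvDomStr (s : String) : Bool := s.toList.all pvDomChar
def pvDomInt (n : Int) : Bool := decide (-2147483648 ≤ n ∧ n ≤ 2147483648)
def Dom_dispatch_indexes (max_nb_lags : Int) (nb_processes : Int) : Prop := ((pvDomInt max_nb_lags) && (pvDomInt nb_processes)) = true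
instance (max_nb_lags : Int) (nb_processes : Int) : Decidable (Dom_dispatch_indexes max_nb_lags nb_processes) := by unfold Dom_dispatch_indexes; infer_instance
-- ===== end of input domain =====

-- B builds each process's column independently, generating its members arithmetically per
-- snake period, instead of A's single pass threading a mutable direction flag (alternative).

-- ===== PORT A =====
def dispatch_indexes (max_nb_lags : Int) (nb_processes : Int) : List (List Int) :=
  let slice_indexes_per_process : List (List Int) :=
    (PySem.List.pyRange 0 nb_processes 1).map (fun _ => ([] : List Int))
  let res :=
    (PySem.List.pyRange 0 (max_nb_lags + 1) 1).foldl
      (fun (st : List (List Int) × Bool) i =>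
        let args_idx := PySem.Int.mod i nb_processes
        let new_args_idx := if st.2 then args_idx else nb_processes - 1 - args_idx
        let direction := if args_idx == nb_processes - 1 then !st.2 else st.2
        (PySem.List.pySetD st.1 new_args_idx
          (PySem.List.pyGetD st.1 new_args_idx [] ++ [i + 1]), direction))
      (slice_indexes_per_process, true)
  res.1

-- ===== PORT B =====
def dispatch_indexes_alt (max_nb_lags : Int) (nb_processes : Int) : List (List Int) :=
  let n := max_nb_lags + 1
  (PySem.List.pyRange 0 nb_processes 1).map (fun c =>
    (PySem.List.pyRange 0 n (2 * nb_processes)).foldl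
      (fun col base =>
        let col2 := if base + c < n then col ++ [base + c + 1] else col
        if base + 2 * nb_processes - 1 - c < n then col2 ++ [base + 2 * nb_processes - c]
        else col2)
      [])

-- ===== PRECONDITION & SPEC =====
-- Pre_ is exactly the set of inputs on which A returns: elsewhere A raises
-- (ZeroDivisionError for nb_processes = 0, IndexError for nb_processes < 0 with a
-- nonempty range, AssertionError for max_nb_lags ≤ -2).
def Pre_dispatch_indexes (max_nb_lags : Int) (nb_processes : Int) : Prop :=
  max_nb_lags = -1 ∨ (0 ≤ max_nb_lags ∧ 1 ≤ nb_processes)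
instance (max_nb_lags : Int) (nb_processes : Int) : Decidable (Pre_dispatch_indexes max_nb_lags nb_processes) := by unfold Pre_dispatch_indexes; infer_instance

def pvWitness_dispatch_indexes : Int × Int := (5, 2)

def Spec_dispatch_indexes (max_nb_lags : Int) (nb_processes : Int) (out : List (List Int)) : Prop := out = dispatch_indexes_alt max_nb_lags nb_processes
instance (max_nb_lags : Int) (nb_processes : Int) (out : List (List Int)) : Decidable (Spec_dispatch_indexes max_nb_lags nb_processes out) := by unfold Spec_dispatch_indexes; infer_instance

-- ===== CLAIM (what is proved, stated in full; the proofs are below) =====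
def Claim_equal_dispatch_indexes : Prop := ∀ (max_nb_lags : Int) (nb_processes : Int), Dom_dispatch_indexes max_nb_lags nb_processes → Pre_dispatch_indexes max_nb_lags nb_processes → Spec_dispatch_indexes max_nb_lags nb_processes (dispatch_indexes max_nb_lags nb_processes)

-- ===== LEMMAS AND PROOFS =====

-- Proof-only abbreviations for the two ports' bodies.
def pvStep (nb : Int) (st : List (List Int) × Bool) (i : Int) : List (List Int) × Bool :=
  let args_idx := PySem.Int.mod i nb
  let new_args_idx := if st.2 then args_idx else nb - 1 - args_idx
  let direction := if args_idx == nb - 1 then !st.2 else st.2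
  (PySem.List.pySetD st.1 new_args_idx
    (PySem.List.pyGetD st.1 new_args_idx [] ++ [i + 1]), direction)

def pvPred (nb c i : Int) : Bool :=
  (if PySem.Int.mod (PySem.Int.floordiv i nb) 2 == 0
   then PySem.Int.mod i nb
   else nb - 1 - PySem.Int.mod i nb) == c

def pvCol (nb m c : Int) : List Int :=
  ((PySem.List.pyRange 0 m 1).filter (pvPred nb c)).map (fun i => i + 1)

lemma set_map_range {α : Type} (n : Nat) (f : Nat → α) (k : Nat) (v : α) :
    ((List.range n).map f).set k v
      = (List.range n).map (fun j => if j = k then v else f j) := by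
  apply List.ext_getElem
  · simp
  · intro i h1 h2
    simp only [List.getElem_set, List.getElem_map, List.getElem_range]
    by_cases h : k = i <;> simp [h, eq_comm]

lemma pv_succ_fd (nb k : Int) (hnb : 0 < nb) :
    PySem.Int.floordiv (k + 1) nb
      = PySem.Int.floordiv k nb + (if PySem.Int.mod k nb = nb - 1 then 1 else 0) := by
  have h1 := PySem.Int.floordiv_mul_add_mod k nb
  have h2 := PySem.Int.mod_nonneg k hnb
  have h3 := PySem.Int.mod_lt k hnb
  by_cases h : PySem.Int.mod k nb = nb - 1
  · simp only [h, if_pos]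
    rw [PySem.Int.floordiv_eq_iff_of_pos hnb]
    constructor <;> nlinarith
  · have h4 : PySem.Int.mod k nb < nb - 1 := by
      rcases lt_or_eq_of_le (by omega : PySem.Int.mod k nb ≤ nb - 1) with h' | h'
      · exact h'
      · exact absurd h' h
    simp only [h, if_neg, not_false_iff, add_zero]
    rw [PySem.Int.floordiv_eq_iff_of_pos hnb]
    constructor <;> nlinarith

lemma pv_dir_step (nb k : Int) (hnb : 0 < nb) :
    (if PySem.Int.mod k nb == nb - 1
     then !(decide (PySem.Int.mod (PySem.Int.floordiv k nb) 2 = 0))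
     else decide (PySem.Int.mod (PySem.Int.floordiv k nb) 2 = 0))
    = decide (PySem.Int.mod (PySem.Int.floordiv (k + 1) nb) 2 = 0) := by
  rw [pv_succ_fd nb k hnb]
  have h2 : (0:Int) < 2 := by norm_num
  by_cases h : PySem.Int.mod k nb = nb - 1
  · simp only [h, if_pos, beq_self_eq_true]
    simp only [PySem.Int.mod_eq_emod_of_pos h2]
    by_cases hq : PySem.Int.floordiv k nb % 2 = 0 <;> simp [hq] <;> omega
  · have : (PySem.Int.mod k nb == nb - 1) = false := by simp [h]
    simp [this, h]

lemma pvCol_succ (nb c k : Int) (hk : 0 ≤ k) :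
    pvCol nb (k + 1) c = pvCol nb k c ++ (if pvPred nb c k then [k + 1] else []) := by
  unfold pvCol
  rw [PySem.List.pyRange_one_succ_right hk, List.filter_append, List.map_append]
  congr 1
  by_cases h : pvPred nb c k <;> simp [List.filter, h]

lemma pv_pred_eq (nb c k : Int) :
    pvPred nb c k
      = ((if decide (PySem.Int.mod (PySem.Int.floordiv k nb) 2 = 0) = true
          then PySem.Int.mod k nb else nb - 1 - PySem.Int.mod k nb) == c) := by
  unfold pvPred
  by_cases h2 : PySem.Int.mod (PySem.Int.floordiv k nb) 2 = 0 <;> simp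

lemma pv_loop_inv (nb : Int) (hnb : 1 ≤ nb) (k : Nat) :
    (PySem.List.pyRange 0 (k : Int) 1).foldl (pvStep nb)
        ((PySem.List.pyRange 0 nb 1).map (fun _ => ([] : List Int)), true)
      = ((PySem.List.pyRange 0 nb 1).map (fun c => pvCol nb (k : Int) c),
         decide (PySem.Int.mod (PySem.Int.floordiv (k : Int) nb) 2 = 0)) := by
  have hnb0 : (0:Int) < nb := by omega
  induction k with
  | zero =>
    have h0 : PySem.Int.floordiv 0 nb = 0 := by
      rw [PySem.Int.floordiv_eq_iff_of_pos hnb0]; refine ⟨by simp, by simp; omega⟩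
    rw [show ((0:Nat):Int) = 0 from rfl, PySem.List.pyRange_one_eq_nil (le_refl (0:Int))]
    simp [pvCol, PySem.List.pyRange_one_eq_nil (le_refl (0:Int)), h0]
  | succ k ih =>
    have hk0 : (0:Int) ≤ (k:Int) := Int.natCast_nonneg k
    have hcast : ((k+1 : Nat) : Int) = (k : Int) + 1 := by push_cast; ring
    rw [hcast, PySem.List.pyRange_one_succ_right hk0, List.foldl_append, ih]
    have hr0 := PySem.Int.mod_nonneg (k:Int) hnb0
    have hrlt := PySem.Int.mod_lt (k:Int) hnb0
    simp only [pvStep, List.foldl_cons, List.foldl_nil]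
    simp only [Prod.mk.injEq]
    refine ⟨?_, pv_dir_step nb (k:Int) hnb0⟩
    set s : Int := if decide (PySem.Int.mod (PySem.Int.floordiv (↑k) nb) 2 = 0) = true
        then PySem.Int.mod (↑k) nb else nb - 1 - PySem.Int.mod (↑k) nb with hs
    have hs0 : 0 ≤ s := by rw [hs]; split <;> omega
    have hslt : s < nb := by rw [hs]; split <;> omega
    rw [PySem.List.pyGetD_map_pyRange_of_nonneg (fun c => pvCol nb (↑k) c) nb s [] hs0 hslt]
    rw [PySem.List.pySetD_of_nonneg _ _ hs0]
    rw [PySem.List.pyRange_one 0 nb, List.map_map, List.map_map, set_map_range]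
    apply List.map_congr_left
    intro j hj
    simp only [List.mem_range] at hj
    have hjlt : (j:Int) < nb := by omega
    simp only [Function.comp, zero_add]
    rw [pvCol_succ nb _ (↑k) hk0, pv_pred_eq nb _ (↑k), ← hs]
    by_cases hji : (j:Int) = s
    · have hj' : j = s.toNat := by omega
      have : (s == (j:Int)) = true := by simp [hji]
      simp [hj', Int.toNat_of_nonneg hs0]
    · have : (s == (j:Int)) = false := by simp [Ne.symm hji]
      simp [this]
      intro h; omega

lemma pvA_unfold (max_nb_lags nb : Int) :
    dispatch_indexes max_nb_lags nb
      = ((PySem.List.pyRange 0 (max_nb_lags + 1) 1).foldl (pvStep nb)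
          ((PySem.List.pyRange 0 nb 1).map (fun _ => ([] : List Int)), true)).1 := rfl

def pvStepB (nb n c : Int) (col : List Int) (base : Int) : List Int :=
  let col2 := if base + c < n then col ++ [base + c + 1] else col
  if base + 2 * nb - 1 - c < n then col2 ++ [base + 2 * nb - c] else col2

lemma pv_filter_two (p : Int → Bool) (a b p1 p2 : Int) (h1 : a ≤ p1) (h12 : p1 < p2)
    (hcar : ∀ i, a ≤ i → i < b → (p i = true ↔ i = p1 ∨ i = p2)) :
    (PySem.List.pyRange a b 1).filter p
      = (if p1 < b then [p1] else []) ++ (if p2 < b then [p2] else []) := by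
  have hnil : ∀ (x y : Int), a ≤ x → (∀ i, x ≤ i → i < y → i ≠ p1 ∧ i ≠ p2) → y ≤ b →
      (PySem.List.pyRange x y 1).filter p = [] := by
    intro x y hx hni hyb
    rw [List.filter_eq_nil_iff]
    intro i hi
    rw [PySem.List.mem_pyRange_one] at hi
    have hne := hni i hi.1 hi.2
    intro hp
    rcases (hcar i (le_trans hx hi.1) (lt_of_lt_of_le hi.2 hyb)).mp hp with h | h
    · exact hne.1 h
    · exact hne.2 h
  by_cases hb1 : p1 < b
  · by_cases hb2 : p2 < b
    · rw [PySem.List.pyRange_one_append a p1 b h1 (le_of_lt hb1),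
          PySem.List.pyRange_one_cons hb1,
          show PySem.List.pyRange (p1+1) b 1
             = PySem.List.pyRange (p1+1) p2 1 ++ PySem.List.pyRange p2 b 1 from
            PySem.List.pyRange_one_append (p1+1) p2 b (by omega) (le_of_lt hb2),
          PySem.List.pyRange_one_cons hb2]
      have e1 := hnil a p1 (le_refl a) (by omega) (by omega)
      have e2 := hnil (p1+1) p2 (by omega) (by omega) (by omega)
      have e3 := hnil (p2+1) b (by omega) (by omega) (le_refl b)
      have hp1 : p p1 = true := (hcar p1 h1 hb1).mpr (Or.inl rfl)
      have hp2 : p p2 = true := (hcar p2 (by omega) hb2).mpr (Or.inr rfl)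
      simp [List.filter_append, e1, e2, e3, List.filter, hp1, hp2, hb1, hb2]
    · rw [PySem.List.pyRange_one_append a p1 b h1 (le_of_lt hb1),
          PySem.List.pyRange_one_cons hb1]
      have e1 := hnil a p1 (le_refl a) (by omega) (by omega)
      have e2 := hnil (p1+1) b (by omega) (by omega) (le_refl b)
      have hp1 : p p1 = true := (hcar p1 h1 hb1).mpr (Or.inl rfl)
      simp [List.filter_append, e1, e2, List.filter, hp1, hb1, hb2]
  · have hb2 : ¬ p2 < b := by omega
    have := hnil a b (le_refl a) (by omega) (le_refl b)
    simp [this, hb1, hb2]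

lemma pv_pred_window (nb c i t : Int) (hnb : 1 ≤ nb) (_hc0 : 0 ≤ c) (hc : c < nb)
    (_ht : 0 ≤ t) (h1 : 2*nb*t ≤ i) (h2 : i < 2*nb*t + 2*nb) :
    (pvPred nb c i = true ↔ i = 2*nb*t + c ∨ i = 2*nb*t + 2*nb - 1 - c) := by
  have hnb0 : (0:Int) < nb := by omega
  by_cases hhalf : i < 2*nb*t + nb
  · have hfd : PySem.Int.floordiv i nb = 2*t := by
      rw [PySem.Int.floordiv_eq_iff_of_pos hnb0]
      constructor <;> nlinarith
    have hmod : PySem.Int.mod i nb = i - 2*nb*t := by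
      have h := PySem.Int.floordiv_mul_add_mod i nb
      rw [hfd] at h; nlinarith
    have hpar : PySem.Int.mod (2*t) 2 = 0 := by
      rw [PySem.Int.mod_eq_emod_of_pos (by norm_num)]; omega
    rw [pv_pred_eq]
    simp only [hfd, hmod, hpar, decide_true, if_pos, beq_iff_eq]
    omega
  · have hfd : PySem.Int.floordiv i nb = 2*t + 1 := by
      rw [PySem.Int.floordiv_eq_iff_of_pos hnb0]
      constructor <;> nlinarith
    have hmod : PySem.Int.mod i nb = i - 2*nb*t - nb := by
      have h := PySem.Int.floordiv_mul_add_mod i nb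
      rw [hfd] at h; nlinarith
    have hpar : ¬ PySem.Int.mod (2*t+1) 2 = 0 := by
      rw [PySem.Int.mod_eq_emod_of_pos (by norm_num)]; omega
    rw [pv_pred_eq]
    simp only [hfd, hmod, hpar, decide_false, Bool.false_eq_true, if_false, beq_iff_eq]
    omega

lemma pv_fold_colB (nb n c : Int) (hnb : 1 ≤ nb) (hc0 : 0 ≤ c) (hc : c < nb) (N : Nat) :
    ((List.range N).map (fun (k : Nat) => (0:Int) + 2*nb*(k:Int))).foldl (pvStepB nb n c) []
      = ((PySem.List.pyRange 0 (min (2*nb*(N:Int)) n) 1).filter (pvPred nb c)).map (fun i => i + 1) := by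
  induction N with
  | zero =>
    have : min (2*nb*((0:Nat):Int)) n ≤ 0 := by simp
    rw [PySem.List.pyRange_one_eq_nil this]
    simp
  | succ N ih =>
    rw [List.range_succ, List.map_append, List.foldl_append, ih]
    simp only [List.map_cons, List.map_nil, List.foldl_cons, List.foldl_nil, zero_add]
    have hb0 : (0:Int) ≤ 2*nb*(N:Int) := by positivity
    have hbs : 2*nb*((N:Int)+1) = 2*nb*(N:Int) + 2*nb := by ring
    have hcast : (((N+1):Nat):Int) = (N:Int)+1 := by push_cast; ring
    rw [hcast, hbs]
    by_cases hn : n ≤ 2*nb*(N:Int)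
    · have hm1 : min (2*nb*(N:Int)) n = n := by omega
      have hm2 : min (2*nb*(N:Int) + 2*nb) n = n := by omega
      rw [hm1, hm2]
      unfold pvStepB
      have c1 : ¬ (2*nb*(N:Int) + c < n) := by omega
      have c2 : ¬ (2*nb*(N:Int) + 2*nb - 1 - c < n) := by omega
      simp [c1, c2]
    · have hm1 : min (2*nb*(N:Int)) n = 2*nb*(N:Int) := by omega
      have hm2 : min (2*nb*(N:Int) + 2*nb) n ≤ n := by omega
      rw [hm1]
      rw [PySem.List.pyRange_one_append 0 (2*nb*(N:Int)) (min (2*nb*(N:Int) + 2*nb) n) hb0 (by omega),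
          List.filter_append, List.map_append]
      rw [pv_filter_two (pvPred nb c) (2*nb*(N:Int)) (min (2*nb*(N:Int) + 2*nb) n)
            (2*nb*(N:Int) + c) (2*nb*(N:Int) + 2*nb - 1 - c) (by omega) (by omega)
            (fun i hi1 hi2 => pv_pred_window nb c i (N:Int) hnb hc0 hc (by positivity) hi1 (by omega))]
      unfold pvStepB
      have e1 : (2*nb*(N:Int) + c < min (2*nb*(N:Int) + 2*nb) n) ↔ (2*nb*(N:Int) + c < n) := by omega
      have e2 : (2*nb*(N:Int) + 2*nb - 1 - c < min (2*nb*(N:Int) + 2*nb) n) ↔ (2*nb*(N:Int) + 2*nb - 1 - c < n) := by omega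
      by_cases d1 : 2*nb*(N:Int) + c < n <;> by_cases d2 : 2*nb*(N:Int) + 2*nb - 1 - c < n <;>
        simp [d1, d2, e1, e2] <;> ring_nf

lemma pv_foldB_eq_pvCol (nb n c : Int) (hnb : 1 ≤ nb) (hc0 : 0 ≤ c) (hc : c < nb) :
    (PySem.List.pyRange 0 n (2 * nb)).foldl (pvStepB nb n c) [] = pvCol nb n c := by
  have hs : (0:Int) < 2 * nb := by omega
  rw [PySem.List.pyRange_of_pos 0 n hs, pv_fold_colB nb n c hnb hc0 hc]
  unfold pvCol
  by_cases hpos : 0 < n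
  · have hq0 : 0 ≤ (n - 0 + 2 * nb - 1) / (2 * nb) := Int.ediv_nonneg (by omega) (by omega)
    have hcast : (((n - 0 + 2 * nb - 1) / (2 * nb)).toNat : Int)
        = (n - 0 + 2 * nb - 1) / (2 * nb) := Int.toNat_of_nonneg hq0
    have hceil := Int.lt_ediv_add_one_mul_self (n - 0 + 2 * nb - 1) hs
    have hge : n ≤ 2 * nb * ((((n - 0 + 2 * nb - 1) / (2 * nb)).toNat : Nat) : Int) := by
      rw [hcast]; nlinarith
    rw [if_pos hpos, min_eq_right hge]
  · rw [if_neg hpos]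
    have h1 : min (2 * nb * (((0:Nat)):Int)) n ≤ 0 := by simp
    rw [PySem.List.pyRange_one_eq_nil h1, PySem.List.pyRange_one_eq_nil (by omega : n ≤ 0)]

lemma pvB_unfold (max_nb_lags nb : Int) :
    dispatch_indexes_alt max_nb_lags nb
      = (PySem.List.pyRange 0 nb 1).map (fun c =>
          (PySem.List.pyRange 0 (max_nb_lags + 1) (2 * nb)).foldl
            (pvStepB nb (max_nb_lags + 1) c) []) := rfl

-- ===== VERDICT (by name: the statement is the Claim_ definition above) =====
theorem dispatch_indexes_spec : Claim_equal_dispatch_indexes := by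
  intro max_nb_lags nb _ hpre
  unfold Spec_dispatch_indexes
  rw [pvA_unfold, pvB_unfold]
  by_cases hnb : 1 ≤ nb
  · have hn : 0 ≤ max_nb_lags + 1 := by rcases hpre with h | ⟨h1, _⟩ <;> omega
    have hk : ((max_nb_lags + 1).toNat : Int) = max_nb_lags + 1 := by omega
    rw [← hk, pv_loop_inv nb hnb]
    apply List.map_congr_left
    intro c hc
    rw [PySem.List.mem_pyRange_one] at hc
    exact (pv_foldB_eq_pvCol nb _ c hnb hc.1 hc.2).symm
  · have hm : max_nb_lags = -1 := by
      rcases hpre with h | ⟨h1, h2⟩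
      · exact h
      · omega
    subst hm
    rw [PySem.List.pyRange_one_eq_nil (show nb ≤ (0:Int) by omega)]
    simp
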